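-- pv_equiv track=rewrite | github.com/naruto716/coin_detection | Utils/connectedness_analysis.py | connected_region_labelling
-- ===== SOURCE A (Python) =====
-- class Queue:
--     def __init__(self):
--         self.items = []
--
--     def isEmpty(self):
--         return self.items == []
--
--     def enqueue(self, item):
--         self.items.insert(0, item)
--
--     def dequeue(self):
--         return self.items.pop()
--
--     def size(self):
--         return len(self.items)
--
-- def connected_region_labelling(pixel_array):
--     image_height = len(pixel_array)
--     image_width = len(pixel_array[0])
--     labeled_image = [[0 for _ in row] for row in pixel_array]
--     region_dict = {}
--     queue = Queue()
--     label = 1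
--     neighbors = [(-1, 0), (1, 0), (0, -1), (0, 1)]
--     visited = set()  # Use a set to keep track of visited pixels
--
--     for row in range(image_height):  # Corrected loop range to iterate over image height
--         for col in range(image_width):  # Corrected loop range to iterate over image width
--             if pixel_array[row][col] > 0 and (row, col) not in visited:
--                 labeled_image[row][col] = label
--                 region_dict[label] = 1
--                 queue.enqueue((row, col))
--                 visited.add((row, col))  # Mark the pixel as visited
--
--                 while not queue.isEmpty():
--                     pixel = queue.dequeue()
--                     for dx, dy in neighbors:
--                         nx, ny = pixel[0] + dx, pixel[1] + dy
--                         # Check if the neighbor pixel is within the image bounds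
--                         if 0 <= nx < image_height and 0 <= ny < image_width:
--                             if pixel_array[nx][ny] > 0 and (nx, ny) not in visited:
--                                 labeled_image[nx][ny] = label
--                                 queue.enqueue((nx, ny))
--                                 visited.add((nx, ny))  # Mark the neighbor pixel as visited
--                                 region_dict[label] += 1
--
--                 label += 1
--
--     return labeled_image, region_dict
-- ===== SOURCE B (Python) =====
-- def connected_region_labelling(pixel_array):
--     image_height = len(pixel_array)
--     image_width = len(pixel_array[0])
--     fg = set()
--     for r in range(image_height):
--         for c in range(image_width):
--             if pixel_array[r][c] > 0:
--                 fg.add((r, c))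
--     labeled_image = [[0 for _ in row] for row in pixel_array]
--     region_dict = {}
--     seen = set()
--     label = 1
--     for r in range(image_height):
--         for c in range(image_width):
--             if (r, c) in fg and (r, c) not in seen:
--                 # grow the component by set saturation: repeatedly absorb all
--                 # foreground neighbours of the current set until it stops growing
--                 comp = {(r, c)}
--                 while True:
--                     new = set(comp)
--                     for (pr, pc) in comp:
--                         for nb in ((pr - 1, pc), (pr + 1, pc), (pr, pc - 1), (pr, pc + 1)):
--                             if nb in fg:
--                                 new.add(nb)
--                     if len(new) == len(comp):
--                         break
--                     comp = new
--                 for (pr, pc) in comp: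
--                     labeled_image[pr][pc] = label
--                 region_dict[label] = len(comp)
--                 seen |= comp
--                 label += 1
--     return labeled_image, region_dict
-- ===== Notes on version B (the rewrite author's own statement) =====
-- stated objective: alternative
-- what changed: Replaces the per-region queue BFS (with per-pixel visited bookkeeping and incremental dict counting) by a set-saturation flood fill: a precomputed foreground set, then for each unseen foreground pixel in scan order the component is grown by repeatedly absorbing all foreground neighbours of the whole current set until it stops growing, after which the component is labelled, counted and merged into 'seen' wholesale.
import Mathlib
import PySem

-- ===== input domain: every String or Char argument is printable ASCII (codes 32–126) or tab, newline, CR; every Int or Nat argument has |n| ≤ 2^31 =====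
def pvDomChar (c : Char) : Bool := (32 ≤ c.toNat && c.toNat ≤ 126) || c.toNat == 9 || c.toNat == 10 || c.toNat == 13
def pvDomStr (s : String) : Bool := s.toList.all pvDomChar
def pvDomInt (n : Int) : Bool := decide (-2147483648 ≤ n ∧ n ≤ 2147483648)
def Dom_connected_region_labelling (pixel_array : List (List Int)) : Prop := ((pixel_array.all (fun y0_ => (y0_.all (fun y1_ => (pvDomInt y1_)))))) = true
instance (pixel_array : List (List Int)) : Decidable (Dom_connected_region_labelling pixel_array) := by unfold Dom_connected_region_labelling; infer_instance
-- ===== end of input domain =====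

-- B replaces A's per-region queue BFS by set-saturation flood fill (repeatedly absorb all
-- foreground neighbours of the component until it stops growing); objective: alternative
-- (not faster). Return value only; neither program mutates its argument.

-- shared small helpers
-- pixel_array[r][c]; used only after the 0 ≤ r < height / 0 ≤ c-in-range guards, where it is exact
def pvGrid2 (pa : List (List Int)) (r c : Int) : Int :=
  (pa.getD r.toNat []).getD c.toNat 0
-- labeled[r][c] = v; used only with 0 ≤ r, 0 ≤ c and in bounds, where it is exact
def pvSet2 (lab : List (List Int)) (r c v : Int) : List (List Int) :=
  lab.set r.toNat ((lab.getD r.toNat []).set c.toNat v)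

-- ===== PORT A =====
def pvNeighbors : List (Int × Int) := [(-1, 0), (1, 0), (0, -1), (0, 1)]

structure PvStA where
  lab : List (List Int)
  dict : PySem.Dict Int Int
  vis : PySem.Set (Int × Int)

-- body of A's `for dx, dy in neighbors` loop (queue: newest first, so enqueue = cons)
def pvStepA (pa : List (List Int)) (h w : Nat) (label : Int) (p : Int × Int)
    (acc : List (Int × Int) × PvStA) (off : Int × Int) : List (Int × Int) × PvStA :=
  let nx := p.1 + off.1
  let ny := p.2 + off.2
  if 0 ≤ nx ∧ nx < (h : Int) ∧ 0 ≤ ny ∧ ny < (w : Int) then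
    if pvGrid2 pa nx ny > 0 ∧ ¬ ((nx, ny) ∈ acc.2.vis) then
      ((nx, ny) :: acc.1,
       { lab := pvSet2 acc.2.lab nx ny label,
         dict := acc.2.dict.modify label 0 (· + 1),
         vis := PySem.Set.add acc.2.vis (nx, ny) })
    else acc
  else acc

-- A's `while not queue.isEmpty()` loop; dequeue = items.pop() = last element.
-- The fuel h*w is provably sufficient (each enqueue marks a fresh pixel visited).
def pvBfsA (pa : List (List Int)) (h w : Nat) (label : Int) :
    Nat → List (Int × Int) → PvStA → PvStA
  | 0, _, st => st
  | fuel + 1, q, st =>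
    match q.getLast? with
    | none => st
    | some p =>
      let (q2, st2) := pvNeighbors.foldl (pvStepA pa h w label p) (q.dropLast, st)
      pvBfsA pa h w label fuel q2 st2

-- body of A's double scan loop
def pvSeedA (pa : List (List Int)) (h w : Nat) (acc : PvStA × Int) (r c : Int) :
    PvStA × Int :=
  let st := acc.1
  let label := acc.2
  if pvGrid2 pa r c > 0 ∧ ¬ ((r, c) ∈ st.vis) then
    let st1 : PvStA :=
      { lab := pvSet2 st.lab r c label,
        dict := st.dict.insert label 1,
        vis := PySem.Set.add st.vis (r, c) }
    (pvBfsA pa h w label (h * w) [(r, c)] st1, label + 1)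
  else acc

def connected_region_labelling (pixel_array : List (List Int)) :
    List (List Int) × (List (Int × Int)) :=
  let h := pixel_array.length
  let w := (pixel_array.getD 0 []).length
  let lab0 := pixel_array.map (fun row => row.map (fun _ => (0 : Int)))
  let init : PvStA × Int := (⟨lab0, PySem.Dict.empty, PySem.Set.empty⟩, 1)
  let fin := (PySem.List.pyRange 0 h 1).foldl (fun acc r =>
      (PySem.List.pyRange 0 w 1).foldl (fun acc c => pvSeedA pixel_array h w acc r c) acc)
    init
  (fin.1.lab, (fin.1.dict).items)

-- ===== PORT B =====
def pvNbrsOf (p : Int × Int) : List (Int × Int) :=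
  [(p.1 - 1, p.2), (p.1 + 1, p.2), (p.1, p.2 - 1), (p.1, p.2 + 1)]

-- new = set(comp); for (pr,pc) in comp: for nb in …: if nb in fg: new.add(nb)
def pvExpand (fg comp : PySem.Set (Int × Int)) : PySem.Set (Int × Int) :=
  comp.foldl (fun acc p =>
    (pvNbrsOf p).foldl (fun acc nb => if nb ∈ fg then PySem.Set.add acc nb else acc) acc) comp

-- B's `while True: … if len(new) == len(comp): break; comp = new`; the fuel h*w+1 is
-- provably sufficient: every continuing iteration strictly grows comp, which has ≤ h*w cells
def pvSatB (fg : PySem.Set (Int × Int)) : Nat → PySem.Set (Int × Int) → PySem.Set (Int × Int)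
  | 0, comp => comp
  | fuel + 1, comp =>
    let new := pvExpand fg comp
    if new.length = comp.length then comp else pvSatB fg fuel new

structure PvStB where
  lab : List (List Int)
  dict : PySem.Dict Int Int
  seen : PySem.Set (Int × Int)

-- body of B's double scan loop
def pvSeedB (h w : Nat) (fg : PySem.Set (Int × Int))
    (acc : PvStB × Int) (r c : Int) : PvStB × Int :=
  let st := acc.1
  let label := acc.2
  if (r, c) ∈ fg ∧ ¬ ((r, c) ∈ st.seen) then
    let comp := pvSatB fg (h * w + 1) (PySem.Set.ofList [(r, c)])
    ({ lab := comp.foldl (fun lab p => pvSet2 lab p.1 p.2 label) st.lab,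
       dict := st.dict.insert label (comp.length : Int),
       seen := PySem.Set.update st.seen comp }, label + 1)
  else acc

def connected_region_labelling_alt (pixel_array : List (List Int)) :
    List (List Int) × (List (Int × Int)) :=
  let h := pixel_array.length
  let w := (pixel_array.getD 0 []).length
  let fg : PySem.Set (Int × Int) :=
    (PySem.List.pyRange 0 h 1).foldl (fun fg r =>
      (PySem.List.pyRange 0 w 1).foldl (fun fg c =>
        if pvGrid2 pixel_array r c > 0 then PySem.Set.add fg (r, c) else fg) fg)
      PySem.Set.empty
  let lab0 := pixel_array.map (fun row => row.map (fun _ => (0 : Int)))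
  let init : PvStB × Int := (⟨lab0, PySem.Dict.empty, PySem.Set.empty⟩, 1)
  let fin := (PySem.List.pyRange 0 h 1).foldl (fun acc r =>
      (PySem.List.pyRange 0 w 1).foldl (fun acc c => pvSeedB h w fg acc r c) acc)
    init
  (fin.1.lab, (fin.1.dict).items)

-- ===== PRECONDITION & SPEC =====
-- Pre_ excludes exactly the inputs where the Python A raises IndexError: the empty image
-- (pixel_array[0]) and ragged images with a row shorter than row 0 (pixel_array[r][c]).
def Pre_connected_region_labelling (pixel_array : List (List Int)) : Prop :=
  pixel_array ≠ [] ∧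
    ∀ row ∈ pixel_array, (pixel_array.getD 0 []).length ≤ row.length
instance (pixel_array : List (List Int)) : Decidable (Pre_connected_region_labelling pixel_array) := by
  unfold Pre_connected_region_labelling; infer_instance

def pvWitness_connected_region_labelling : List (List Int) := [[1, 0, 2], [1, 0, 0], [0, 3, 3]]

def Spec_connected_region_labelling (pixel_array : List (List Int)) (out : List (List Int) × (List (Int × Int))) : Prop := out = connected_region_labelling_alt pixel_array
instance (pixel_array : List (List Int)) (out : List (List Int) × (List (Int × Int))) : Decidable (Spec_connected_region_labelling pixel_array out) := by unfold Spec_connected_region_labelling; infer_instance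

-- ===== CLAIM (what is proved, stated in full; the proofs are below) =====
def Claim_equal_connected_region_labelling : Prop := ∀ (pixel_array : List (List Int)), Dom_connected_region_labelling pixel_array → Pre_connected_region_labelling pixel_array → Spec_connected_region_labelling pixel_array (connected_region_labelling pixel_array)

-- ===== LEMMAS AND PROOFS =====

-- the foreground predicate both programs test ((r,c) in bounds with a positive pixel)
def pvFgP (pa : List (List Int)) (h w : Nat) (q : Int × Int) : Prop :=
  0 ≤ q.1 ∧ q.1 < (h : Int) ∧ 0 ≤ q.2 ∧ q.2 < (w : Int) ∧ pvGrid2 pa q.1 q.2 > 0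

-- the label-writing fold step
def pvWr (label : Int) (lab : List (List Int)) (x : Int × Int) : List (List Int) :=
  pvSet2 lab x.1 x.2 label

theorem pvNbrs_symm (p q : Int × Int) (h : q ∈ pvNbrsOf p) : p ∈ pvNbrsOf q := by
  obtain ⟨p1, p2⟩ := p; obtain ⟨q1, q2⟩ := q
  simp only [pvNbrsOf, List.mem_cons, Prod.mk.injEq,
    List.not_mem_nil, or_false] at h ⊢
  omega

theorem pv_mem_nbrs_iff (p x : Int × Int) :
    x ∈ pvNbrsOf p ↔ ∃ off ∈ pvNeighbors, x = (p.1 + off.1, p.2 + off.2) := by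
  obtain ⟨p1, p2⟩ := p; obtain ⟨x1, x2⟩ := x
  simp only [pvNbrsOf, pvNeighbors, List.mem_cons, Prod.mk.injEq,
    List.not_mem_nil, or_false]
  constructor
  · rintro (⟨h1, h2⟩ | ⟨h1, h2⟩ | ⟨h1, h2⟩ | ⟨h1, h2⟩)
    · exact ⟨(-1, 0), by simp, by simp; omega⟩
    · exact ⟨(1, 0), by simp, by simp; omega⟩
    · exact ⟨(0, -1), by simp, by simp; omega⟩
    · exact ⟨(0, 1), by simp, by simp; omega⟩
  · rintro ⟨⟨o1, o2⟩, ho, h⟩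
    simp only [Prod.mk.injEq] at h ho
    rcases ho with ⟨h1,h2⟩|⟨h1,h2⟩|⟨h1,h2⟩|⟨h1,h2⟩ <;> subst h1 <;> subst h2 <;> simp at h <;> omega

theorem pvSetN_comm (lab : List (List Int)) (i a j b : Nat) (v : Int) :
    (lab.set i ((lab.getD i []).set a v)).set j
      (((lab.set i ((lab.getD i []).set a v)).getD j []).set b v) =
    (lab.set j ((lab.getD j []).set b v)).set i
      (((lab.set j ((lab.getD j []).set b v)).getD i []).set a v) := by
  by_cases hij : i = j
  · subst hij
    by_cases hi : i < lab.length
    · have h1 : ∀ X : List Int, (lab.set i X).getD i [] = X := by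
        intro X; simp [List.getD, hi]
      rw [h1, h1, List.set_set, List.set_set]
      by_cases hab : a = b
      · subst hab; rfl
      · rw [List.set_comm _ _ hab]
    · have hle : lab.length ≤ i := by omega
      have h0 : ∀ X : List Int, lab.set i X = lab := fun X => List.set_eq_of_length_le hle
      simp only [h0]
  · have h2 : ∀ X, (lab.set i X).getD j [] = lab.getD j [] := by
      intro X; simp [List.getD, List.getElem?_set_ne (by omega : i ≠ j)]
    have h3 : ∀ X, (lab.set j X).getD i [] = lab.getD i [] := by
      intro X; simp [List.getD, List.getElem?_set_ne (by omega : j ≠ i)]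
    rw [h2, h3, List.set_comm _ _ hij]

theorem pvSet2_comm (lab : List (List Int)) (p q : Int × Int) (v : Int) :
    pvSet2 (pvSet2 lab p.1 p.2 v) q.1 q.2 v = pvSet2 (pvSet2 lab q.1 q.2 v) p.1 p.2 v := by
  simp only [pvSet2]
  exact pvSetN_comm lab p.1.toNat p.2.toNat q.1.toNat q.2.toNat v

theorem pv_card_bound (pa : List (List Int)) (h w : Nat) (l : List (Int × Int))
    (hn : l.Nodup) (hf : ∀ x ∈ l, pvFgP pa h w x) : l.length ≤ h * w := by
  have hsub : l ⊆ (PySem.List.pyRange 0 h 1) ×ˢ (PySem.List.pyRange 0 w 1) := by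
    intro x hx
    obtain ⟨h1, h2, h3, h4, _⟩ := hf x hx
    obtain ⟨x1, x2⟩ := x
    show _ ∈ _ ×ˢ _
    simp only [SProd.sprod, List.product, List.mem_flatMap, List.mem_map]
    refine ⟨x1, ?_, x2, ?_, rfl⟩
    · rw [PySem.List.mem_pyRange_one]; omega
    · rw [PySem.List.mem_pyRange_one]; omega
  have := (List.subperm_of_subset hn hsub).length_le
  simpa [List.length_product, PySem.List.length_pyRange_one] using this


theorem pv_wr_perm (label : Int) {L L' : List (Int × Int)} (hp : L.Perm L') (lab : List (List Int)) :
    L.foldl (pvWr label) lab = L'.foldl (pvWr label) lab := by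
  haveI : RightCommutative (pvWr label) := ⟨fun lab p q => pvSet2_comm lab p q label⟩
  exact hp.foldl_eq lab

theorem pv_modify_insert (d : PySem.Dict Int Int) (k v : Int) :
    (d.insert k v).modify k 0 (· + 1) = d.insert k (v + 1) := by
  simp [PySem.Dict.modify, PySem.Dict.getD_insert_self, PySem.Dict.insert_insert_self]

theorem pv_modify_fold (l : List (Int × Int)) (d : PySem.Dict Int Int) (k v : Int) :
    l.foldl (fun d _ => d.modify k 0 (· + 1)) (d.insert k v) = d.insert k (v + l.length) := by
  induction l generalizing v with
  | nil => simp
  | cons x l ih => simp [pv_modify_insert, ih, add_assoc]; ring_nf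

-- inner add-if fold: membership / nodup / prefix (generic in the scanned list)
theorem pv_addif_mem (fg : PySem.Set (Int × Int)) (l : List (Int × Int))
    (s : PySem.Set (Int × Int)) (x : Int × Int) :
    x ∈ l.foldl (fun acc nb => if nb ∈ fg then PySem.Set.add acc nb else acc) s ↔
      x ∈ s ∨ (x ∈ l ∧ x ∈ fg) := by
  induction l generalizing s with
  | nil => simp
  | cons y l ih =>
    simp only [List.foldl_cons, ih]
    by_cases hy : y ∈ fg <;> simp [hy, PySem.Set.mem_add] <;> constructor <;> rintro h <;>
      aesop

theorem pv_addif_nodup (fg : PySem.Set (Int × Int)) (l : List (Int × Int))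
    (s : PySem.Set (Int × Int)) (hs : s.Nodup) :
    (l.foldl (fun acc nb => if nb ∈ fg then PySem.Set.add acc nb else acc) s).Nodup := by
  induction l generalizing s with
  | nil => simpa
  | cons y l ih =>
    simp only [List.foldl_cons]
    split <;> [exact ih _ (PySem.Set.nodup_add _ _ hs); exact ih _ hs]

theorem pv_addif_prefix (fg : PySem.Set (Int × Int)) (l : List (Int × Int))
    (s : PySem.Set (Int × Int)) :
    s <+: l.foldl (fun acc nb => if nb ∈ fg then PySem.Set.add acc nb else acc) s := by
  induction l generalizing s with
  | nil => simp
  | cons y l ih =>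
    simp only [List.foldl_cons]
    split
    · refine List.IsPrefix.trans ?_ (ih _)
      rw [PySem.Set.add_eq_ite]; split <;> simp
    · exact ih _

theorem pv_expand_mem (fg comp : PySem.Set (Int × Int)) (x : Int × Int) :
    x ∈ pvExpand fg comp ↔ x ∈ comp ∨ ∃ p ∈ comp, x ∈ pvNbrsOf p ∧ x ∈ fg := by
  unfold pvExpand
  have gen : ∀ (l : List (Int × Int)) (s : PySem.Set (Int × Int)),
      x ∈ l.foldl (fun acc p =>
        (pvNbrsOf p).foldl (fun acc nb => if nb ∈ fg then PySem.Set.add acc nb else acc) acc) s ↔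
      x ∈ s ∨ ∃ p ∈ l, x ∈ pvNbrsOf p ∧ x ∈ fg := by
    intro l
    induction l with
    | nil => simp
    | cons y l ih =>
      intro s
      simp only [List.foldl_cons, ih, pv_addif_mem]
      aesop
  exact gen comp comp

theorem pv_expand_prefix (fg comp : PySem.Set (Int × Int)) : comp <+: pvExpand fg comp := by
  unfold pvExpand
  have gen : ∀ (l : List (Int × Int)) (s : PySem.Set (Int × Int)),
      s <+: l.foldl (fun acc p =>
        (pvNbrsOf p).foldl (fun acc nb => if nb ∈ fg then PySem.Set.add acc nb else acc) acc) s := by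
    intro l
    induction l with
    | nil => simp
    | cons y l ih => exact fun s => List.IsPrefix.trans (pv_addif_prefix fg _ s) (ih _)
  exact gen comp comp

theorem pv_expand_nodup (fg comp : PySem.Set (Int × Int)) (h : comp.Nodup) :
    (pvExpand fg comp).Nodup := by
  unfold pvExpand
  have gen : ∀ (l : List (Int × Int)) (s : PySem.Set (Int × Int)), s.Nodup →
      (l.foldl (fun acc p =>
        (pvNbrsOf p).foldl (fun acc nb => if nb ∈ fg then PySem.Set.add acc nb else acc) acc) s).Nodup := by
    intro l
    induction l with
    | nil => exact fun s hs => hs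
    | cons y l ih => exact fun s hs => ih _ (pv_addif_nodup fg _ s hs)
  exact gen comp comp h

-- the foreground set built by B
theorem pv_fgrow_mem (pa : List (List Int)) (r : Int) (l : List Int)
    (s : PySem.Set (Int × Int)) (x : Int × Int) :
    x ∈ l.foldl (fun fg c => if pvGrid2 pa r c > 0 then PySem.Set.add fg (r, c) else fg) s ↔
      x ∈ s ∨ ∃ c ∈ l, x = (r, c) ∧ pvGrid2 pa r c > 0 := by
  induction l generalizing s with
  | nil => simp
  | cons y l ih =>
    simp only [List.foldl_cons, ih]
    by_cases hy : pvGrid2 pa r y > 0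
    · simp only [if_pos hy, PySem.Set.mem_add]
      constructor
      · rintro ((hx | rfl) | ⟨c, hc, rfl, hg⟩)
        · exact Or.inl hx
        · exact Or.inr ⟨y, by simp, rfl, hy⟩
        · exact Or.inr ⟨c, by simp [hc], rfl, hg⟩
      · rintro (hx | ⟨c, hc, rfl, hg⟩)
        · exact Or.inl (Or.inl hx)
        · rcases List.mem_cons.mp hc with rfl | hc
          · exact Or.inl (Or.inr rfl)
          · exact Or.inr ⟨c, hc, rfl, hg⟩
    · simp only [if_neg hy]
      constructor
      · rintro (hx | ⟨c, hc, rfl, hg⟩)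
        · exact Or.inl hx
        · exact Or.inr ⟨c, by simp [hc], rfl, hg⟩
      · rintro (hx | ⟨c, hc, rfl, hg⟩)
        · exact Or.inl hx
        · rcases List.mem_cons.mp hc with rfl | hc
          · exact absurd hg hy
          · exact Or.inr ⟨c, hc, rfl, hg⟩

theorem pv_fg_mem (pa : List (List Int)) (h w : Nat) (x : Int × Int) :
    x ∈ ((PySem.List.pyRange 0 h 1).foldl (fun fg r =>
      (PySem.List.pyRange 0 w 1).foldl (fun fg c =>
        if pvGrid2 pa r c > 0 then PySem.Set.add fg (r, c) else fg) fg)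
      PySem.Set.empty) ↔ pvFgP pa h w x := by
  have gen : ∀ (l : List Int) (s : PySem.Set (Int × Int)),
      x ∈ l.foldl (fun fg r =>
        (PySem.List.pyRange 0 w 1).foldl (fun fg c =>
          if pvGrid2 pa r c > 0 then PySem.Set.add fg (r, c) else fg) fg) s ↔
      x ∈ s ∨ ∃ r ∈ l, ∃ c, c ∈ PySem.List.pyRange 0 w 1 ∧ x = (r, c) ∧ pvGrid2 pa r c > 0 := by
    intro l
    induction l with
    | nil => simp
    | cons y l ih =>
      intro s
      simp only [List.foldl_cons, ih, pv_fgrow_mem]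
      constructor
      · rintro ((hx | ⟨c, hc, rfl, hg⟩) | ⟨r, hr, c, hc, rfl, hg⟩)
        · exact Or.inl hx
        · exact Or.inr ⟨y, by simp, c, hc, rfl, hg⟩
        · exact Or.inr ⟨r, by simp [hr], c, hc, rfl, hg⟩
      · rintro (hx | ⟨r, hr, c, hc, rfl, hg⟩)
        · exact Or.inl (Or.inl hx)
        · rcases List.mem_cons.mp hr with rfl | hr
          · exact Or.inl (Or.inr ⟨c, hc, rfl, hg⟩)
          · exact Or.inr ⟨r, hr, c, hc, rfl, hg⟩
  rw [gen]
  unfold pvFgP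
  constructor
  · rintro (hx | ⟨r, hr, c, hc, rfl, hg⟩)
    · simp [PySem.Set.empty] at hx
    · rw [PySem.List.mem_pyRange_one] at hr hc
      exact ⟨hr.1, hr.2, hc.1, hc.2, hg⟩
  · rintro ⟨h1, h2, h3, h4, hg⟩
    refine Or.inr ⟨x.1, ?_, x.2, ?_, rfl, hg⟩
    · rw [PySem.List.mem_pyRange_one]; omega
    · rw [PySem.List.mem_pyRange_one]; omega

theorem pv_sat_spec (pa : List (List Int)) (h w : Nat) (fg : PySem.Set (Int × Int))
    (hfg : ∀ x, x ∈ fg ↔ pvFgP pa h w x)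
    (fuel : Nat) (comp : PySem.Set (Int × Int))
    (hn : comp.Nodup) (hsub : ∀ x ∈ comp, pvFgP pa h w x)
    (hfuel : h * w + 1 ≤ fuel + comp.length) :
    (pvSatB fg fuel comp).Nodup ∧ (∀ x ∈ comp, x ∈ pvSatB fg fuel comp) ∧
    (∀ x ∈ pvSatB fg fuel comp, pvFgP pa h w x) ∧
    (∀ p ∈ pvSatB fg fuel comp, ∀ nb ∈ pvNbrsOf p, pvFgP pa h w nb → nb ∈ pvSatB fg fuel comp) ∧
    (∀ V : Int × Int → Prop,
      (∀ p, V p → ∀ nb ∈ pvNbrsOf p, pvFgP pa h w nb → V nb) →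
      ((∀ x ∈ comp, V x) → ∀ x ∈ pvSatB fg fuel comp, V x) ∧
      ((∀ x ∈ comp, ¬ V x) → ∀ x ∈ pvSatB fg fuel comp, ¬ V x)) := by
  induction fuel generalizing comp with
  | zero =>
    exfalso
    have := pv_card_bound pa h w comp hn hsub
    omega
  | succ fuel ih =>
    by_cases hlen : (pvExpand fg comp).length = comp.length
    · have hres : pvSatB fg (fuel + 1) comp = comp := by simp [pvSatB, hlen]
      have hEq : pvExpand fg comp = comp :=
        ((pv_expand_prefix fg comp).eq_of_length hlen.symm).symm
      rw [hres]
      refine ⟨hn, fun x hx => hx, hsub, ?_, ?_⟩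
      · intro p hp nb hnb hfgp
        have : nb ∈ pvExpand fg comp :=
          (pv_expand_mem fg comp nb).mpr (Or.inr ⟨p, hp, hnb, (hfg nb).mpr hfgp⟩)
        rwa [hEq] at this
      · intro V _
        exact ⟨fun hv x hx => hv x hx, fun hv x hx => hv x hx⟩
    · have hres : pvSatB fg (fuel + 1) comp = pvSatB fg fuel (pvExpand fg comp) := by
        simp [pvSatB, hlen]
      have hpre := pv_expand_prefix fg comp
      have hss : comp ⊆ pvExpand fg comp := hpre.subset
      have hlt : comp.length < (pvExpand fg comp).length :=
        lt_of_le_of_ne hpre.length_le (fun e => hlen e.symm)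
      have hn' := pv_expand_nodup fg comp hn
      have hsub' : ∀ x ∈ pvExpand fg comp, pvFgP pa h w x := by
        intro x hx
        rcases (pv_expand_mem fg comp x).mp hx with hx | ⟨p, _, _, hxf⟩
        · exact hsub x hx
        · exact (hfg x).mp hxf
      obtain ⟨c1, c2, c3, c4, c5⟩ :=
        ih (pvExpand fg comp) hn' hsub' (by omega)
      rw [hres]
      refine ⟨c1, fun x hx => c2 x (hss hx), c3, c4, ?_⟩
      · intro V hV
        obtain ⟨d1, d2⟩ := c5 V hV
        constructor
        · intro hcomp
          refine d1 ?_
          intro x hx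
          rcases (pv_expand_mem fg comp x).mp hx with hx | ⟨p, hp, hnb, hxf⟩
          · exact hcomp x hx
          · exact hV p (hcomp p hp) x hnb ((hfg x).mp hxf)
        · intro hcomp
          refine d2 ?_
          intro x hx hVx
          rcases (pv_expand_mem fg comp x).mp hx with hx | ⟨p, hp, hnb, hxf⟩
          · exact hcomp x hx hVx
          · exact hcomp p hp (hV x hVx p (pvNbrs_symm p x hnb) (hsub p hp))

theorem pvStepA_eq (pa : List (List Int)) (h w : Nat) (label : Int) (p : Int × Int)
    (q : List (Int × Int)) (st : PvStA) (off : Int × Int) :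
    pvStepA pa h w label p (q, st) off =
      if (0 ≤ p.1 + off.1 ∧ p.1 + off.1 < (h : Int) ∧ 0 ≤ p.2 + off.2 ∧ p.2 + off.2 < (w : Int) ∧
            pvGrid2 pa (p.1 + off.1) (p.2 + off.2) > 0) ∧ (p.1 + off.1, p.2 + off.2) ∉ st.vis then
        ((p.1 + off.1, p.2 + off.2) :: q,
         { lab := pvWr label st.lab (p.1 + off.1, p.2 + off.2),
           dict := st.dict.modify label 0 (· + 1),
           vis := PySem.Set.add st.vis (p.1 + off.1, p.2 + off.2) })
      else (q, st) := by
  simp only [pvStepA, pvWr, pvSet2]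
  split_ifs with h1 h2 h3 h4 h5 <;> first | rfl | (exfalso; tauto)

theorem pv_inner_fold (pa : List (List Int)) (h w : Nat) (label : Int) (p : Int × Int)
    (offs : List (Int × Int)) (q : List (Int × Int)) (st : PvStA) :
    ∃ L : List (Int × Int),
      offs.foldl (pvStepA pa h w label p) (q, st) =
        (L.reverse ++ q,
         { lab := L.foldl (pvWr label) st.lab,
           dict := L.foldl (fun d _ => d.modify label 0 (· + 1)) st.dict,
           vis := st.vis ++ L }) ∧
      L.Nodup ∧
      (∀ x ∈ L, x ∉ st.vis ∧ pvFgP pa h w x ∧ ∃ off ∈ offs, x = (p.1 + off.1, p.2 + off.2)) ∧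
      (∀ off ∈ offs, pvFgP pa h w (p.1 + off.1, p.2 + off.2) →
        (p.1 + off.1, p.2 + off.2) ∈ st.vis ++ L) := by
  induction offs generalizing q st with
  | nil =>
    refine ⟨[], ?_, by simp, by simp, by simp⟩
    simp
  | cons off offs ih =>
    simp only [List.foldl_cons, pvStepA_eq]
    by_cases hacc : (0 ≤ p.1 + off.1 ∧ p.1 + off.1 < (h : Int) ∧ 0 ≤ p.2 + off.2 ∧
        p.2 + off.2 < (w : Int) ∧ pvGrid2 pa (p.1 + off.1) (p.2 + off.2) > 0) ∧
        (p.1 + off.1, p.2 + off.2) ∉ st.vis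
    · rw [if_pos hacc]
      set nb := (p.1 + off.1, p.2 + off.2) with hnb
      obtain ⟨L1, hEq, hN, hprop, hcompl⟩ :=
        ih (nb :: q) ⟨pvWr label st.lab nb, st.dict.modify label 0 (· + 1), PySem.Set.add st.vis nb⟩
      have hvis : PySem.Set.add st.vis nb = st.vis ++ [nb] := PySem.Set.add_of_not_mem hacc.2
      refine ⟨nb :: L1, ?_, ?_, ?_, ?_⟩
      · rw [hEq]
        congr 1
        · simp
        · congr 1
          rw [hvis, List.append_assoc]
          rfl
      · refine List.Nodup.cons ?_ hN
        intro hmem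
        exact (hprop nb hmem).1 (by rw [hvis]; simp)
      · intro x hx
        rcases List.mem_cons.mp hx with rfl | hx
        · exact ⟨hacc.2, hacc.1, off, by simp, rfl⟩
        · obtain ⟨hnv, hfgx, off', ho', hx'⟩ := hprop x hx
          refine ⟨fun hmem => hnv (by rw [hvis]; simp [hmem]), hfgx, off', by simp [ho'], hx'⟩
      · intro off' ho' hfg'
        rcases List.mem_cons.mp ho' with rfl | ho'
        · simp only [List.mem_append, List.mem_cons]
          exact Or.inr (Or.inl hnb)
        · have := hcompl off' ho' hfg'
          rw [hvis, List.append_assoc] at this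
          simpa using this
    · rw [if_neg hacc]
      obtain ⟨L1, hEq, hN, hprop, hcompl⟩ := ih q st
      refine ⟨L1, hEq, hN, ?_, ?_⟩
      · intro x hx
        obtain ⟨hnv, hfgx, off', ho', hx'⟩ := hprop x hx
        exact ⟨hnv, hfgx, off', by simp [ho'], hx'⟩
      · intro off' ho' hfg'
        rcases List.mem_cons.mp ho' with rfl | ho'
        · have hmem : (p.1 + off'.1, p.2 + off'.2) ∈ st.vis := by tauto
          simp [hmem]
        · exact hcompl off' ho' hfg'

theorem pv_bfs_run (pa : List (List Int)) (h w : Nat) (label : Int)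
    (comp : List (Int × Int))
    (hcC : ∀ p ∈ comp, ∀ nb ∈ pvNbrsOf p, pvFgP pa h w nb → nb ∈ comp)
    (fuel : Nat) (q L : List (Int × Int))
    (lab₀ : List (List Int)) (d₀ : PySem.Dict Int Int) (vis₀ : PySem.Set (Int × Int))
    (hLn : L.Nodup) (hLd : ∀ x ∈ L, x ∉ vis₀) (hLc : ∀ x ∈ L, x ∈ comp)
    (hq : q.Nodup) (hqL : ∀ x ∈ q, x ∈ L)
    (hfr : ∀ x ∈ L, x ∉ q → ∀ nb ∈ pvNbrsOf x, pvFgP pa h w nb → nb ∈ vis₀ ++ L)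
    (hfuel : q.length + comp.length ≤ fuel + L.length) :
    ∃ L' : List (Int × Int),
      pvBfsA pa h w label fuel q
        ⟨L.foldl (pvWr label) lab₀, d₀.insert label (L.length : Int), vis₀ ++ L⟩ =
        ⟨L'.foldl (pvWr label) lab₀, d₀.insert label (L'.length : Int), vis₀ ++ L'⟩ ∧
      L'.Nodup ∧ (∀ x ∈ L', x ∉ vis₀) ∧ (∀ x ∈ L', x ∈ comp) ∧ (∀ x ∈ L, x ∈ L') ∧
      (∀ x ∈ L', ∀ nb ∈ pvNbrsOf x, pvFgP pa h w nb → nb ∈ vis₀ ++ L') := by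
  induction fuel generalizing q L with
  | zero =>
    have hLlen : L.length ≤ comp.length := (List.subperm_of_subset hLn hLc).length_le
    have hq0 : q = [] := List.eq_nil_of_length_eq_zero (by omega)
    subst hq0
    exact ⟨L, rfl, hLn, hLd, hLc, fun x hx => hx, fun x hx => hfr x hx (by simp)⟩
  | succ fuel ih =>
    cases hq0 : q.getLast? with
    | none =>
      have hqnil : q = [] := List.getLast?_eq_none_iff.mp hq0
      subst hqnil
      refine ⟨L, ?_, hLn, hLd, hLc, fun x hx => hx, fun x hx => hfr x hx (by simp)⟩
      simp [pvBfsA]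
    | some p =>
      have hqne : q ≠ [] := by rintro rfl; simp at hq0
      have hqsplit : q.dropLast ++ [p] = q := List.dropLast_append_getLast? p hq0
      have hpq : p ∈ q := by rw [← hqsplit]; simp
      have hpL : p ∈ L := hqL p hpq
      obtain ⟨Ln, hEq, hLnN, hprop, hcompl⟩ :=
        pv_inner_fold pa h w label p pvNeighbors q.dropLast
          ⟨L.foldl (pvWr label) lab₀, d₀.insert label (L.length : Int), vis₀ ++ L⟩
      have hunf : pvBfsA pa h w label (fuel + 1) q
          ⟨L.foldl (pvWr label) lab₀, d₀.insert label (L.length : Int), vis₀ ++ L⟩ =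
          pvBfsA pa h w label fuel (Ln.reverse ++ q.dropLast)
            ⟨(L ++ Ln).foldl (pvWr label) lab₀, d₀.insert label (((L ++ Ln).length : Nat) : Int),
             vis₀ ++ (L ++ Ln)⟩ := by
        rw [pvBfsA, hq0]
        dsimp only
        rw [hEq]
        dsimp only
        rw [List.foldl_append, pv_modify_fold]
        simp [List.length_append, List.append_assoc]
      -- facts about the freshly enqueued pixels
      have hLnfresh : ∀ x ∈ Ln, x ∉ vis₀ ++ L := fun x hx => (hprop x hx).1
      have hLnnbr : ∀ x ∈ Ln, x ∈ pvNbrsOf p := by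
        intro x hx
        obtain ⟨-, -, off, ho, hx'⟩ := hprop x hx
        exact (pv_mem_nbrs_iff p x).mpr ⟨off, ho, hx'⟩
      have hLncomp : ∀ x ∈ Ln, x ∈ comp := fun x hx =>
        hcC p (hLc p hpL) x (hLnnbr x hx) (hprop x hx).2.1
      have hL2n : (L ++ Ln).Nodup := by
        rw [List.nodup_append]
        refine ⟨hLn, hLnN, ?_⟩
        intro x hxL y hyLn heq
        subst heq
        exact hLnfresh x hyLn (by simp [hxL])
      have hdropn : q.dropLast.Nodup := (List.dropLast_sublist q).nodup hq
      have hq2n : (Ln.reverse ++ q.dropLast).Nodup := by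
        rw [List.nodup_append]
        refine ⟨List.nodup_reverse.mpr hLnN, hdropn, ?_⟩
        intro x hxLn y hydrop heq
        subst heq
        exact hLnfresh x (List.mem_reverse.mp hxLn)
          (by simp [hqL x (by rw [← hqsplit]; exact List.mem_append_left _ hydrop)])
      have hq2L : ∀ x ∈ Ln.reverse ++ q.dropLast, x ∈ L ++ Ln := by
        intro x hx
        rcases List.mem_append.mp hx with hx | hx
        · exact List.mem_append_right _ (List.mem_reverse.mp hx)
        · exact List.mem_append_left _ (hqL x (by rw [← hqsplit]; exact List.mem_append_left _ hx))
      have hfr2 : ∀ x ∈ L ++ Ln, x ∉ Ln.reverse ++ q.dropLast →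
          ∀ nb ∈ pvNbrsOf x, pvFgP pa h w nb → nb ∈ vis₀ ++ (L ++ Ln) := by
        intro x hx hxq nb hnb hfgnb
        rcases List.mem_append.mp hx with hxL | hxLn
        · by_cases hxp : x = p
          · subst hxp
            obtain ⟨off, ho, hnb'⟩ := (pv_mem_nbrs_iff x nb).mp hnb
            have := hcompl off ho (by rw [← hnb']; exact hfgnb)
            rw [← hnb'] at this
            simpa [List.append_assoc] using this
          · have hxnq : x ∉ q := by
              intro hxq'
              rcases List.mem_append.mp (by rw [hqsplit]; exact hxq' :
                  x ∈ q.dropLast ++ [p]) with hxd | hxp'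
              · exact hxq (List.mem_append_right _ hxd)
              · exact hxp (by simpa using hxp')
            have := hfr x hxL hxnq nb hnb hfgnb
            rcases List.mem_append.mp this with hv | hv
            · exact List.mem_append_left _ hv
            · exact List.mem_append_right _ (List.mem_append_left _ hv)
        · exact absurd (List.mem_append_left _ (List.mem_reverse.mpr hxLn)) hxq
      have hfuel2 : (Ln.reverse ++ q.dropLast).length + comp.length ≤ fuel + (L ++ Ln).length := by
        have hql : q.dropLast.length + 1 = q.length := by
          rw [← hqsplit]; simp
        simp only [List.length_append, List.length_reverse]
        omega
      obtain ⟨L', hEq', c1, c2, c3, c4, c5⟩ :=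
        ih (Ln.reverse ++ q.dropLast) (L ++ Ln) hL2n
          (fun x hx => by
            rcases List.mem_append.mp hx with hx | hx
            · exact hLd x hx
            · exact fun hv => hLnfresh x hx (List.mem_append_left _ hv))
          (fun x hx => by
            rcases List.mem_append.mp hx with hx | hx
            · exact hLc x hx
            · exact hLncomp x hx)
          hq2n hq2L hfr2 hfuel2
      refine ⟨L', ?_, c1, c2, c3, fun x hx => c4 x (List.mem_append_left _ hx), c5⟩
      rw [hunf]
      exact_mod_cast hEq'


-- ---- relating the two scan loops ----

def pvRel (pa : List (List Int)) (h w : Nat) (a : PvStA × Int) (b : PvStB × Int) : Prop :=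
  a.1.lab = b.1.lab ∧ a.1.dict = b.1.dict ∧ a.2 = b.2 ∧
  (∀ x, x ∈ a.1.vis ↔ x ∈ b.1.seen) ∧
  a.1.vis.Nodup ∧ b.1.seen.Nodup ∧
  (∀ p, p ∈ a.1.vis → ∀ nb ∈ pvNbrsOf p, pvFgP pa h w nb → nb ∈ a.1.vis) ∧
  (∀ k ∈ a.1.dict.keys, k < a.2)

theorem pv_seed_step (pa : List (List Int)) (h w : Nat) (fg : PySem.Set (Int × Int))
    (hfg : ∀ x, x ∈ fg ↔ pvFgP pa h w x)
    (a : PvStA × Int) (b : PvStB × Int) (r c : Int)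
    (hr : 0 ≤ r ∧ r < (h : Int)) (hc : 0 ≤ c ∧ c < (w : Int))
    (hrel : pvRel pa h w a b) :
    pvRel pa h w (pvSeedA pa h w a r c) (pvSeedB h w fg b r c) := by
  obtain ⟨hlab, hdict, hlabel, hseen, hvisN, hseenN, hcl, hkeys⟩ := hrel
  unfold pvSeedA pvSeedB
  by_cases hcond : pvGrid2 pa r c > 0 ∧ ¬((r, c) ∈ a.1.vis)
  case neg =>
    have hcondB : ¬((r, c) ∈ fg ∧ ¬((r, c) ∈ b.1.seen)) := by
      rintro ⟨h1, h2⟩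
      exact hcond ⟨((hfg _).mp h1).2.2.2.2, fun hv => h2 ((hseen _).mp hv)⟩
    rw [if_neg hcond, if_neg hcondB]
    exact ⟨hlab, hdict, hlabel, hseen, hvisN, hseenN, hcl, hkeys⟩
  case pos =>
    have hfgs : pvFgP pa h w (r, c) := ⟨hr.1, hr.2, hc.1, hc.2, hcond.1⟩
    have hcondB : (r, c) ∈ fg ∧ ¬((r, c) ∈ b.1.seen) :=
      ⟨(hfg _).mpr hfgs, fun hs => hcond.2 ((hseen _).mpr hs)⟩
    rw [if_pos hcond, if_pos hcondB]
    dsimp only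
    have hofl : PySem.Set.ofList [((r : Int), (c : Int))] = [(r, c)] := rfl
    obtain ⟨cN, cIn, cFg, cCl, cV⟩ :=
      pv_sat_spec pa h w fg hfg (h * w + 1) (PySem.Set.ofList [(r, c)])
        (by rw [hofl]; simp)
        (by rw [hofl]; intro x hx; simp at hx; subst hx; exact hfgs)
        (by rw [hofl]; simp)
    have hsin : (r, c) ∈ pvSatB fg (h * w + 1) (PySem.Set.ofList [(r, c)]) := by
      apply cIn; rw [hofl]; simp
    set comp := pvSatB fg (h * w + 1) (PySem.Set.ofList [(r, c)]) with hcompdef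
    have compBound : comp.length ≤ h * w := pv_card_bound pa h w comp cN cFg
    have hvadd : PySem.Set.add a.1.vis (r, c) = a.1.vis ++ [(r, c)] :=
      PySem.Set.add_of_not_mem hcond.2
    obtain ⟨L', hrun, n1, n2, n3, n4, n5⟩ :=
      pv_bfs_run pa h w a.2 comp cCl (h * w) [(r, c)] [(r, c)] a.1.lab a.1.dict a.1.vis
        (by simp)
        (by intro x hx; simp at hx; subst hx; exact hcond.2)
        (by intro x hx; simp at hx; subst hx; exact hsin)
        (by simp)
        (fun x hx => hx)
        (by intro x hx hnx; simp at hx; subst hx; simp at hnx)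
        (by simp; omega)
    have hsL' : (r, c) ∈ L' := n4 (r, c) (by simp)
    have hUcl : ∀ p, p ∈ a.1.vis ++ L' → ∀ nb ∈ pvNbrsOf p, pvFgP pa h w nb →
        nb ∈ a.1.vis ++ L' := by
      intro p hp nb hnb hfgnb
      rcases List.mem_append.mp hp with hp | hp
      · exact List.mem_append_left _ (hcl p hp nb hnb hfgnb)
      · exact n5 p hp nb hnb hfgnb
    have hdisj : ∀ x ∈ comp, x ∉ a.1.vis := by
      refine (cV (fun x => x ∈ a.1.vis) hcl).2 ?_
      rw [hofl]; intro x hx; simp at hx; subst hx; exact hcond.2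
    have hsub : ∀ x ∈ comp, x ∈ a.1.vis ++ L' := by
      refine (cV (fun x => x ∈ a.1.vis ++ L') hUcl).1 ?_
      rw [hofl]; intro x hx; simp at hx; subst hx
      exact List.mem_append_right _ hsL'
    have memL' : ∀ x, x ∈ L' ↔ x ∈ comp := by
      intro x
      constructor
      · exact n3 x
      · intro hx
        rcases List.mem_append.mp (hsub x hx) with hv | hv
        · exact absurd hv (hdisj x hx)
        · exact hv
    have perm : L'.Perm comp := (List.perm_ext_iff_of_nodup n1 cN).mpr memL'
    rw [hvadd]
    have hshape : (⟨pvSet2 a.1.lab r c a.2, a.1.dict.insert a.2 1, a.1.vis ++ [(r, c)]⟩ : PvStA) =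
        ⟨[((r : Int), (c : Int))].foldl (pvWr a.2) a.1.lab,
         a.1.dict.insert a.2 (([((r : Int), (c : Int))].length : Nat) : Int),
         a.1.vis ++ [(r, c)]⟩ := rfl
    rw [hshape, hrun]
    have hlabelcontains : a.1.dict.contains a.2 = false := by
      by_contra hcc
      have : a.2 ∈ a.1.dict.keys :=
        (PySem.Dict.contains_iff_mem_keys _ _).mp (by revert hcc; cases a.1.dict.contains a.2 <;> simp)
      exact absurd (hkeys _ this) (lt_irrefl _)
    refine ⟨?_, ?_, by show a.2 + 1 = b.2 + 1; rw [hlabel], ?_, ?_, ?_, ?_, ?_⟩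
    · show L'.foldl (pvWr a.2) a.1.lab =
        comp.foldl (fun lab p => pvSet2 lab p.1 p.2 b.2) b.1.lab
      rw [hlab, ← hlabel]
      exact pv_wr_perm a.2 perm b.1.lab
    · show a.1.dict.insert a.2 (L'.length : Int) = b.1.dict.insert b.2 (comp.length : Int)
      rw [hdict, hlabel, perm.length_eq]
    · intro x
      simp only [List.mem_append, PySem.Set.mem_update]
      rw [hseen x]
      constructor
      · rintro (hx | hx)
        · exact Or.inl hx
        · exact Or.inr ((memL' x).mp hx)
      · rintro (hx | hx)
        · exact Or.inl hx
        · exact Or.inr ((memL' x).mpr hx)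
    · rw [List.nodup_append]
      refine ⟨hvisN, n1, ?_⟩
      intro x hxv y hyL heq
      subst heq
      exact n2 x hyL hxv
    · exact PySem.Set.nodup_update _ _ hseenN
    · exact hUcl
    · intro k hk
      show k < a.2 + 1
      rw [PySem.Dict.keys_insert_of_not_contains _ _ hlabelcontains] at hk
      rcases List.mem_append.mp hk with hk | hk
      · exact lt_trans (hkeys k hk) (by omega)
      · simp at hk; omega

theorem pv_fold_rel {σ τ : Type} (l : List Int) (P : Int → Prop) (hl : ∀ x ∈ l, P x)
    (fA : σ → Int → σ) (fB : τ → Int → τ) (R : σ → τ → Prop)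
    (hstep : ∀ a b x, P x → R a b → R (fA a x) (fB b x)) :
    ∀ a b, R a b → R (l.foldl fA a) (l.foldl fB b) := by
  induction l with
  | nil => intro a b hab; simpa using hab
  | cons x l ih =>
    intro a b hab
    simp only [List.foldl_cons]
    exact ih (fun y hy => hl y (by simp [hy])) (fA a x) (fB b x) (hstep a b x (hl x (by simp)) hab)

-- ===== VERDICT (by name: the statement is the Claim_ definition above) =====
theorem connected_region_labelling_spec : Claim_equal_connected_region_labelling := by
  intro pa _ _
  unfold Spec_connected_region_labelling
  unfold connected_region_labelling connected_region_labelling_alt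
  dsimp only
  have hfg : ∀ x, x ∈ ((PySem.List.pyRange 0 pa.length 1).foldl (fun fg r =>
      (PySem.List.pyRange 0 (pa.getD 0 []).length 1).foldl (fun fg c =>
        if pvGrid2 pa r c > 0 then PySem.Set.add fg (r, c) else fg) fg)
      PySem.Set.empty) ↔ pvFgP pa pa.length (pa.getD 0 []).length x :=
    pv_fg_mem pa pa.length (pa.getD 0 []).length
  have hinit : pvRel pa pa.length (pa.getD 0 []).length
      (⟨pa.map (fun row => row.map (fun _ => (0 : Int))), PySem.Dict.empty, PySem.Set.empty⟩, 1)
      (⟨pa.map (fun row => row.map (fun _ => (0 : Int))), PySem.Dict.empty, PySem.Set.empty⟩, 1) := by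
    refine ⟨rfl, rfl, rfl, fun x => Iff.rfl, by simp [PySem.Set.empty], by simp [PySem.Set.empty],
      ?_, ?_⟩
    · intro p hp
      simp [PySem.Set.empty] at hp
    · intro k hk
      simp [PySem.Dict.keys, PySem.Dict.empty] at hk
  have hrel := pv_fold_rel (PySem.List.pyRange 0 pa.length 1)
    (fun r => 0 ≤ r ∧ r < (pa.length : Int))
    (by intro x hx; rw [PySem.List.mem_pyRange_one] at hx; exact hx)
    (fun acc r => (PySem.List.pyRange 0 (pa.getD 0 []).length 1).foldl
      (fun acc c => pvSeedA pa pa.length (pa.getD 0 []).length acc r c) acc)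
    (fun acc r => (PySem.List.pyRange 0 (pa.getD 0 []).length 1).foldl
      (fun acc c => pvSeedB pa.length (pa.getD 0 []).length _ acc r c) acc)
    (pvRel pa pa.length (pa.getD 0 []).length)
    (by
      intro a b rr hrr hab
      exact pv_fold_rel (PySem.List.pyRange 0 (pa.getD 0 []).length 1)
        (fun c => 0 ≤ c ∧ c < ((pa.getD 0 []).length : Int))
        (by intro x hx; rw [PySem.List.mem_pyRange_one] at hx; exact hx)
        _ _ _
        (fun a b cc hcc hab => pv_seed_step pa pa.length (pa.getD 0 []).length _ hfg a b rr cc hrr hcc hab)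
        a b hab)
    _ _ hinit
  obtain ⟨e1, e2, -⟩ := hrel
  rw [e1, e2]
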